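-- pv_equiv track=rewrite | github.com/pglass/GlassCAS | parsing/parser_util.py | get_from_list
-- ===== SOURCE A (Python) =====
-- def get_from_list(expr, start, value_list):
--     '''
--     Return an identifier beginning at index start, where the identifier
--     is something in value_list. Returns None if no such identifier is found.
--
--     This is used in tokenize to grab functions and constants.
--     '''
--
--     token = ''
--     i, j = start, start
--
--     while j < len(expr) and expr[i:j+1] in [f[:j+1 - i] for f in value_list]:
--         token = expr[i:j+1]
--         if token in value_list: # in case of "pipi" or "cossin"
--             return token
--
--         j += 1
--
--     return None
-- ===== SOURCE B (Python) =====
-- def get_from_list(expr, start, value_list):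
--     '''
--     Return an identifier beginning at index start, where the identifier
--     is something in value_list. Returns None if no such identifier is found.
--
--     Single pass over value_list keeping the shortest entry that matches
--     expr at position start (instead of growing a candidate char by char
--     while re-slicing every list entry at each step).
--     '''
--     best = None
--     for v in value_list:
--         if v and expr[start:start+len(v)] == v and (best is None or len(v) < len(best)):
--             best = v
--     return best
-- ===== Notes on version B (the rewrite author's own statement) =====
-- stated objective: simpler
-- what changed: Instead of A's while-loop that grows a candidate one character at a time and at every step rebuilds a list of length-truncated prefixes of every entry in value_list, B makes a single pass over value_list keeping the shortest entry that matches expr at start (equal-length matches are the identical string, so the result is the same).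
-- outside the precondition, e.g. on get_from_list('ab', -1, ['']): A returns '', B returns None
import Mathlib
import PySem

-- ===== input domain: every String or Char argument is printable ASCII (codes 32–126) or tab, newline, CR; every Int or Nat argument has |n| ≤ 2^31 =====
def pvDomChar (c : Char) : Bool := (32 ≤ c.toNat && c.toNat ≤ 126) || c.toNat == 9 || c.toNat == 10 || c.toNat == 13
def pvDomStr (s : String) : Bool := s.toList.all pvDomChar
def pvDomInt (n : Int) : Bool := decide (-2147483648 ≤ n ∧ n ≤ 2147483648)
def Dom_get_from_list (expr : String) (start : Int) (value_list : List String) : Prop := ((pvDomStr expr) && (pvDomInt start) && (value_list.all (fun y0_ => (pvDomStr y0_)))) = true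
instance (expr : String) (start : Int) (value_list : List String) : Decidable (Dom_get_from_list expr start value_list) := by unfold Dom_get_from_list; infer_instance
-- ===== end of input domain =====

-- B replaces A's character-by-character candidate growth (which re-slices every list entry
-- at each step) by a single pass over value_list keeping the shortest matching entry; the
-- equivalence is proved for nonnegative start (Pre_), the tokenizer's natural domain.


-- ===== PORT A =====
-- the while loop: `i` stays fixed, `j` advances; condition and branches in Python's order
def pvALoop (e : List Char) (vl : List (List Char)) (i : Int) (j : Int) : Option (List Char) :=
  if h : j < (e.length : Int) ∧
      (PySem.List.slice e (some i) (some (j+1))) ∈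
        (vl.map (fun f => PySem.List.slice f none (some (j+1-i)))) then
    let token := PySem.List.slice e (some i) (some (j+1))
    if token ∈ vl then some token else pvALoop e vl i (j+1)
  else none
termination_by ((e.length : Int) - j).toNat
decreasing_by omega

def get_from_list (expr : String) (start : Int) (value_list : List String) : Option String :=
  (pvALoop expr.toList (value_list.map String.toList) start start).map (fun t => String.ofList t)

-- ===== PORT B =====
-- `if v and expr[start:start+len(v)] == v and (best is None or len(v) < len(best)): best = v`
def pvBStep (e : List Char) (start : Int) (best : Option (List Char)) (v : List Char) : Option (List Char) :=
  if (!v.isEmpty)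
      && (PySem.List.slice e (some start) (some (start + (v.length : Int))) == v)
      && (match best with | none => true | some b => decide (v.length < b.length)) then
    some v
  else best

def get_from_list_alt (expr : String) (start : Int) (value_list : List String) : Option String :=
  ((value_list.map String.toList).foldl (pvBStep expr.toList start) none).map (fun t => String.ofList t)

-- ===== PRECONDITION & SPEC =====
-- Pre_ excludes negative start: negative-index slice wraparound is outside the tokenizer's
-- natural domain, and there A's scan can return the non-identifier '' (see cites).
def Pre_get_from_list (expr : String) (start : Int) (value_list : List String) : Prop := 0 ≤ start
instance (expr : String) (start : Int) (value_list : List String) : Decidable (Pre_get_from_list expr start value_list) := by unfold Pre_get_from_list; infer_instance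
def pvWitness_get_from_list : String × Int × List String := ("sin(x)", 0, ["sin", "cos"])

def Spec_get_from_list (expr : String) (start : Int) (value_list : List String) (out : Option String) : Prop := out = get_from_list_alt expr start value_list
instance (expr : String) (start : Int) (value_list : List String) (out : Option String) : Decidable (Spec_get_from_list expr start value_list out) := by unfold Spec_get_from_list; infer_instance

-- ===== CLAIM (what is proved, stated in full; the proofs are below) =====
def Claim_equal_get_from_list : Prop := ∀ (expr : String) (start : Int) (value_list : List String), Dom_get_from_list expr start value_list → Pre_get_from_list expr start value_list → Spec_get_from_list expr start value_list (get_from_list expr start value_list)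

-- ===== LEMMAS AND PROOFS =====

def pvScan (t : List Char) (vl : List (List Char)) (k : Nat) : Option (List Char) :=
  if h : k < t.length then
    (if t.take (k+1) ∈ vl then some (t.take (k+1)) else pvScan t vl (k+1))
  else none
termination_by t.length - k

def pvPM (t : List Char) (v : List Char) : Prop := v ≠ [] ∧ v <+: t
def pvMatch (t : List Char) (vl : List (List Char)) (v : List Char) : Prop := v ∈ vl ∧ pvPM t v

-- a match of length k+1 is exactly t.take (k+1)
theorem pvMatch_len (t : List Char) (vl : List (List Char)) (v : List Char)
    (h : pvMatch t vl v) : v = t.take v.length := by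
  exact (List.prefix_iff_eq_take).1 h.2.2

theorem pvTake_mem_map (t : List Char) (vl : List (List Char)) (k : Nat)
    (h : t.take (k+1) ∈ vl) : t.take (k+1) ∈ vl.map (fun f => f.take (k+1)) :=
  List.mem_map.mpr ⟨_, h, by simp [List.take_take]⟩

theorem pvScan_noneOf (t : List Char) (vl : List (List Char)) :
    ∀ n k, t.length - k = n → t.take (k+1) ∉ vl.map (fun f => f.take (k+1)) → pvScan t vl k = none := by
  intro n
  induction n with
  | zero =>
    intro k hk _
    rw [pvScan]
    simp only [dif_neg (by omega : ¬ k < t.length)]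
  | succ n ih =>
    intro k hk hnp
    rw [pvScan]
    by_cases hkl : k < t.length
    · have hmem : t.take (k+1) ∉ vl := fun h => hnp (pvTake_mem_map t vl k h)
      simp only [dif_pos hkl, if_neg hmem]
      refine ih (k+1) (by omega) ?_
      intro hc
      rcases List.mem_map.1 hc with ⟨f, hf, hfe⟩
      refine hnp (List.mem_map.mpr ⟨f, hf, ?_⟩)
      have := congrArg (fun l => List.take (k+1) l) hfe
      simpa [List.take_take] using this
    · simp [dif_neg hkl]

theorem pvScan_none (t : List Char) (vl : List (List Char)) :
    ∀ n k, t.length - k = n → pvScan t vl k = none → ∀ v, pvMatch t vl v → v.length ≤ k := by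
  intro n
  induction n with
  | zero =>
    intro k hk _ v hv
    have : v.length ≤ t.length := hv.2.2.length_le
    omega
  | succ n ih =>
    intro k hk hs v hv
    rw [pvScan] at hs
    by_cases hkl : k < t.length
    · simp only [dif_pos hkl] at hs
      by_cases hmem : t.take (k+1) ∈ vl
      · simp [hmem] at hs
      · simp only [if_neg hmem] at hs
        have hle := ih (k+1) (by omega) hs v hv
        rcases Nat.lt_or_ge v.length (k+1) with h | h
        · omega
        · have hvl : v.length = k + 1 := by omega
          exfalso
          apply hmem
          have := pvMatch_len t vl v hv
          rw [hvl] at this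
          rw [← this]; exact hv.1
    · have : v.length ≤ t.length := hv.2.2.length_le
      omega

theorem pvScan_some (t : List Char) (vl : List (List Char)) :
    ∀ n k w, t.length - k = n → pvScan t vl k = some w →
      pvMatch t vl w ∧ k < w.length ∧ ∀ v, pvMatch t vl v → k < v.length → w.length ≤ v.length := by
  intro n
  induction n with
  | zero =>
    intro k w hk hs
    rw [pvScan] at hs
    simp [dif_neg (by omega : ¬ k < t.length)] at hs
  | succ n ih =>
    intro k w hk hs
    rw [pvScan] at hs
    by_cases hkl : k < t.length
    · simp only [dif_pos hkl] at hs
      by_cases hmem : t.take (k+1) ∈ vl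
      · simp only [if_pos hmem, Option.some.injEq] at hs
        subst hs
        have hlen : (t.take (k+1)).length = k + 1 := by
          simp [List.length_take]; omega
        refine ⟨⟨hmem, ?_, List.take_prefix _ _⟩, by omega, ?_⟩
        · intro h; rw [h] at hlen; simp at hlen
        · intro v hv hkv
          rw [hlen]; omega
      · simp only [if_neg hmem] at hs
        obtain ⟨hm, hlt, hmin⟩ := ih (k+1) w (by omega) hs
        refine ⟨hm, by omega, ?_⟩
        intro v hv hkv
        rcases Nat.lt_or_ge (k+1) v.length with h | h
        · exact hmin v hv h
        · have hvl : v.length = k + 1 := by omega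
          exfalso; apply hmem
          have := pvMatch_len t vl v hv
          rw [hvl] at this
          rw [← this]; exact hv.1
    · simp [dif_neg hkl] at hs


theorem pvALoop_eq_scan (e : List Char) (vl : List (List Char)) (s : Nat) :
    ∀ n k, (e.drop s).length - k = n → pvALoop e vl (s : Int) ((s : Int) + (k : Nat)) = pvScan (e.drop s) vl k := by
  intro n
  induction n with
  | zero =>
    intro k hk
    have hlen : e.length ≤ s + k := by simp [List.length_drop] at hk; omega
    rw [pvALoop, pvScan]
    have h1 : ¬ ((s : Int) + (k : Nat) < (e.length : Int)) := by push_cast; omega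
    have h2 : ¬ (k < e.length - s) := by omega
    simp [h1, h2]
  | succ n ih =>
    intro k hk
    have hkl : k < (e.drop s).length := by omega
    have hjlt : (s : Int) + (k : Nat) < (e.length : Int) := by
      simp [List.length_drop] at hkl; push_cast; omega
    have hc1 : ((s : Int) + (k : Nat) + 1) = (s : Int) + ((k + 1 : Nat) : Int) := by push_cast; ring
    have hslice : PySem.List.slice e (some (s : Int)) (some ((s : Int) + (k : Nat) + 1)) = (e.drop s).take (k+1) := by
      rw [hc1, PySem.List.slice_natCast_add]
    have harg : (fun f : List Char => PySem.List.slice f none (some ((s : Int) + (k : Nat) + 1 - (s : Int)))) = (fun f : List Char => f.take (k+1)) := by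
      funext f
      have h : ((s : Int) + (k : Nat) + 1 - (s : Int)) = ((k + 1 : Nat) : Int) := by push_cast; ring
      rw [h, PySem.List.slice_to_natCast]
    rw [pvALoop, pvScan]
    simp only [harg, hslice, dif_pos hkl]
    by_cases hmem : (e.drop s).take (k+1) ∈ vl
    · rw [dif_pos ⟨hjlt, pvTake_mem_map _ _ _ hmem⟩]
      simp [hmem]
    · by_cases hpm : (e.drop s).take (k+1) ∈ vl.map (fun f => f.take (k+1))
      · rw [dif_pos ⟨hjlt, hpm⟩]
        simp only [if_neg hmem]
        rw [hc1, ih (k+1) (by omega)]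
      · rw [dif_neg (by exact fun h => hpm h.2), if_neg hmem]
        refine (pvScan_noneOf (e.drop s) vl ((e.drop s).length - (k+1)) (k+1) rfl ?_).symm
        intro hc
        rcases List.mem_map.1 hc with ⟨f, hf, hfe⟩
        refine hpm (List.mem_map.mpr ⟨f, hf, ?_⟩)
        have := congrArg (fun l => List.take (k+1) l) hfe
        simpa [List.take_take] using this


theorem pvBStep_pos (e : List Char) (s : Nat) (best : Option (List Char)) (v : List Char)
    (h1 : pvPM (e.drop s) v) (h2 : ∀ b, best = some b → v.length < b.length) :
    pvBStep e (s : Int) best v = some v := by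
  have hp : PySem.List.slice e (some (s : Int)) (some ((s : Int) + (v.length : Int))) = v := by
    rw [PySem.List.slice_natCast_add]; exact ((List.prefix_iff_eq_take).1 h1.2).symm
  unfold pvBStep
  cases best with
  | none => simp [hp, h1.1]
  | some b => simp [hp, h1.1, h2 b rfl]

theorem pvBStep_neg_pm (e : List Char) (s : Nat) (best : Option (List Char)) (v : List Char)
    (h : ¬ pvPM (e.drop s) v) : pvBStep e (s : Int) best v = best := by
  unfold pvBStep
  by_cases hv : v = []
  · simp [hv]
  · have hp : PySem.List.slice e (some (s : Int)) (some ((s : Int) + (v.length : Int))) ≠ v := by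
      rw [PySem.List.slice_natCast_add]
      intro hc
      exact h ⟨hv, (List.prefix_iff_eq_take).2 hc.symm⟩
    simp [hv, hp]

theorem pvBStep_neg_best (e : List Char) (s : Nat) (best : Option (List Char)) (v : List Char)
    (b : List Char) (hb : best = some b) (h : ¬ v.length < b.length) :
    pvBStep e (s : Int) best v = best := by
  subst hb
  unfold pvBStep
  simp [h]

theorem pvFold_char (e : List Char) (s : Nat) :
    ∀ (l : List (List Char)) (b : Option (List Char)),
      (∀ w, b = some w → pvPM (e.drop s) w) →
      ((∀ w, l.foldl (pvBStep e (s : Int)) b = some w → pvPM (e.drop s) w ∧ (w ∈ l ∨ b = some w)) ∧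
       (∀ w, b = some w → ∃ w', l.foldl (pvBStep e (s : Int)) b = some w' ∧ w'.length ≤ w.length) ∧
       (∀ v, v ∈ l → pvPM (e.drop s) v → ∃ w', l.foldl (pvBStep e (s : Int)) b = some w' ∧ w'.length ≤ v.length)) := by
  intro l
  induction l with
  | nil =>
    intro b hb
    refine ⟨fun w hw => ⟨(hb w hw), Or.inr hw⟩, fun w hw => ⟨w, hw, le_refl _⟩, fun v hv => absurd hv (List.not_mem_nil)⟩
  | cons v l' ih =>
    intro b hb
    have hb' : ∀ w, pvBStep e (s : Int) b v = some w → pvPM (e.drop s) w := by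
      intro w hw
      by_cases hpm : pvPM (e.drop s) v
      · by_cases hbest : ∀ c, b = some c → v.length < c.length
        · rw [pvBStep_pos e s b v hpm hbest] at hw
          exact (Option.some.injEq _ _ ▸ hw) ▸ hpm
        · push_neg at hbest
          obtain ⟨c, hc, hlen⟩ := hbest
          rw [pvBStep_neg_best e s b v c hc (not_lt.2 hlen)] at hw
          exact hb w hw
      · rw [pvBStep_neg_pm e s b v hpm] at hw
        exact hb w hw
    obtain ⟨C1, C2, C3⟩ := ih (pvBStep e (s : Int) b v) hb'
    simp only [List.foldl_cons]
    refine ⟨?_, ?_, ?_⟩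
    · intro w hw
      obtain ⟨hpmw, hor⟩ := C1 w hw
      refine ⟨hpmw, ?_⟩
      rcases hor with h | h
      · exact Or.inl (List.mem_cons_of_mem _ h)
      · by_cases hpm : pvPM (e.drop s) v
        · by_cases hbest : ∀ c, b = some c → v.length < c.length
          · rw [pvBStep_pos e s b v hpm hbest] at h
            obtain rfl : v = w := by injection h
            exact Or.inl List.mem_cons_self
          · push_neg at hbest
            obtain ⟨c, hc, hlen⟩ := hbest
            rw [pvBStep_neg_best e s b v c hc (not_lt.2 hlen)] at h
            exact Or.inr h
        · rw [pvBStep_neg_pm e s b v hpm] at h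
          exact Or.inr h
    · intro w hw
      by_cases hpm : pvPM (e.drop s) v
      · by_cases hbest : ∀ c, b = some c → v.length < c.length
        · have hstep := pvBStep_pos e s b v hpm hbest
          obtain ⟨w', hw', hle⟩ := C2 v (by rw [hstep])
          exact ⟨w', hw', le_trans hle (le_of_lt (hbest w hw))⟩
        · push_neg at hbest
          obtain ⟨c, hc, hlen⟩ := hbest
          have hstep := pvBStep_neg_best e s b v c hc (not_lt.2 hlen)
          obtain ⟨w', hw', hle⟩ := C2 w (by rw [hstep]; exact hw)
          exact ⟨w', hw', hle⟩
      · have hstep := pvBStep_neg_pm e s b v hpm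
        obtain ⟨w', hw', hle⟩ := C2 w (by rw [hstep]; exact hw)
        exact ⟨w', hw', hle⟩
    · intro u hu hpmu
      rcases List.mem_cons.1 hu with rfl | hu'
      · by_cases hbest : ∀ c, b = some c → u.length < c.length
        · have hstep := pvBStep_pos e s b u hpmu hbest
          obtain ⟨w', hw', hle⟩ := C2 u (by rw [hstep])
          exact ⟨w', hw', hle⟩
        · push_neg at hbest
          obtain ⟨c, hc, hlen⟩ := hbest
          have hstep := pvBStep_neg_best e s b u c hc (not_lt.2 hlen)
          obtain ⟨w', hw', hle⟩ := C2 c (by rw [hstep]; exact hc)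
          exact ⟨w', hw', le_trans hle (by omega)⟩
      · exact C3 u hu' hpmu

theorem pvMain (e : List Char) (vl : List (List Char)) (s : Nat) :
    pvALoop e vl (s : Int) (s : Int) = vl.foldl (pvBStep e (s : Int)) none := by
  have h0 : pvALoop e vl (s : Int) ((s : Int) + ((0 : Nat) : Int)) = pvScan (e.drop s) vl 0 :=
    pvALoop_eq_scan e vl s _ 0 rfl
  have h0' : pvALoop e vl (s : Int) (s : Int) = pvScan (e.drop s) vl 0 := by simpa using h0
  obtain ⟨C1, C2, C3⟩ := pvFold_char e s vl none (by simp)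
  rw [h0']
  cases hs : pvScan (e.drop s) vl 0 with
  | none =>
    cases hf : vl.foldl (pvBStep e (s : Int)) none with
    | none => rfl
    | some w =>
      obtain ⟨hpm, hor⟩ := C1 w hf
      have hmem : w ∈ vl := hor.resolve_right (by simp)
      have hz := pvScan_none _ vl _ 0 rfl hs w ⟨hmem, hpm⟩
      have hpos : 0 < w.length := List.length_pos_iff.mpr hpm.1
      omega
  | some w =>
    obtain ⟨hmw, hlt, hmin⟩ := pvScan_some _ vl _ 0 w rfl hs
    obtain ⟨w', hw', hle⟩ := C3 w hmw.1 hmw.2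
    obtain ⟨hpmw', hor⟩ := C1 w' hw'
    have hmem' : w' ∈ vl := hor.resolve_right (by simp)
    have hge : w.length ≤ w'.length :=
      hmin w' ⟨hmem', hpmw'⟩ (List.length_pos_iff.mpr hpmw'.1)
    have hlen : w.length = w'.length := le_antisymm hge hle
    rw [hw']
    congr 1
    rw [(List.prefix_iff_eq_take).1 hmw.2.2, (List.prefix_iff_eq_take).1 hpmw'.2, hlen]

-- ===== VERDICT (by name: the statement is the Claim_ definition above) =====
theorem get_from_list_spec : Claim_equal_get_from_list := by
  intro expr start vl _ hpre
  unfold Spec_get_from_list get_from_list get_from_list_alt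
  obtain ⟨s, rfl⟩ : ∃ s : Nat, start = (s : Int) := ⟨start.toNat, (Int.toNat_of_nonneg hpre).symm⟩
  rw [pvMain]
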